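-- pv_equiv track=rewrite | github.com/nedqyu/okpd-pro2 | app.py | hier_lookup
-- ===== SOURCE A (Python) =====
-- def hier_lookup(code: str, lookup: dict) -> tuple[bool, str]:
--     """
--     1. Точное совпадение.
--     2. code начинается на ключ словаря (длинный код → ищем корень).
--     3. Ключ словаря начинается на code (короткий код → группа).
--     """
--     if not code:
--         return False, ''
--     if code in lookup:
--         return True, lookup[code]
--     # ищем самый длинный совпадающий корень
--     best, best_len = '', 0
--     for key in lookup:
--         if code.startswith(key) and len(key) > best_len:
--             best, best_len = key, len(key)
--     if best:
--         return True, lookup[best]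
--     # code — группа, берём первый попавшийся дочерний
--     for key in lookup:
--         if key.startswith(code):
--             return True, lookup[key]
--     return False, ''
-- ===== SOURCE B (Python) =====
-- def hier_lookup(code: str, lookup: dict) -> tuple[bool, str]:
--     """Same hierarchy lookup, but exact match and the longest matching root are
--     found by probing code's prefixes (only the lengths that occur among the
--     keys, longest first) with dict membership instead of scanning every key;
--     the ordered key scan remains only for the child fallback."""
--     if not code:
--         return False, ''
--     for l in sorted({len(key) for key in lookup}, reverse=True):
--         if 1 <= l <= len(code) and code[:l] in lookup:
--             return True, lookup[code[:l]]
--     for key, val in lookup.items():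
--         if key.startswith(code):
--             return True, val
--     return False, ''
-- ===== Notes on version B (the rewrite author's own statement) =====
-- stated objective: alternative
-- what changed: Exact match and longest-root search are replaced by probing code's prefixes with dict membership, only at the distinct key lengths taken longest-first, so the per-key startswith scan survives only in the child-fallback case.
import Mathlib
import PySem

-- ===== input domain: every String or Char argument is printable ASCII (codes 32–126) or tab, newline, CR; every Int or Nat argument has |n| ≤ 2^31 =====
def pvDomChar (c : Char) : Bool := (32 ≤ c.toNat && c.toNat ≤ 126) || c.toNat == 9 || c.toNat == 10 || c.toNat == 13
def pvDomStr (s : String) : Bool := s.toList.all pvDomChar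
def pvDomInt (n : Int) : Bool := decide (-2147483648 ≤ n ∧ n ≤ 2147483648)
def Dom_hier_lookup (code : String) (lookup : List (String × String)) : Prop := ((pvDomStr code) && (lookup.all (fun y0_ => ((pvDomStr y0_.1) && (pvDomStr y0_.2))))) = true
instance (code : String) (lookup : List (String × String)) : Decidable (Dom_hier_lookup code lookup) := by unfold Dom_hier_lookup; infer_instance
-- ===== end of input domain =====

-- B replaces the longest-root key scan by probing code's prefixes longest-to-shortest
-- with dict membership; the ordered key scan survives only in the child-fallback case.

-- ===== PORT A =====
-- loop body of "for key in lookup: if code.startswith(key) and len(key) > best_len: best, best_len = key, len(key)"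
def hierBestStep (code : String) (bb : String × Int) (key : String) : String × Int :=
  if PySem.Str.startswith code key && decide (PySem.Str.len key > bb.2) then
    (key, PySem.Str.len key)
  else bb

def hier_lookup (code : String) (lookup : List (String × String)) : Bool × String :=
  if code = "" then (false, "")
  else
    -- d = the Python dict `lookup` (list-of-pairs under the type convention)
    if (PySem.Dict.ofList lookup).contains code then
      (true, (PySem.Dict.ofList lookup).getD code "")   -- lookup[code]: code ∈ keys here, default unreachable — exact
    else
      let best := (PySem.Dict.ofList lookup).keys.foldl (hierBestStep code) ("", 0)
      if best.1 ≠ "" then (true, (PySem.Dict.ofList lookup).getD best.1 "")  -- lookup[best]: best ∈ keys — exact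
      else
        match (PySem.Dict.ofList lookup).keys.find? (fun key => PySem.Str.startswith key code) with
        | some key => (true, (PySem.Dict.ofList lookup).getD key "")         -- lookup[key]: key ∈ keys — exact
        | none => (false, "")

-- ===== PORT B =====
-- "for l in sorted({len(key) for key in lookup}, reverse=True):
--      if 1 <= l <= len(code) and code[:l] in lookup: return True, lookup[code[:l]]"
-- code[:l] with 0 ≤ l ≤ len(code) is exactly take l; len(key) is kept as a Nat
-- (lengths are nonnegative, so Python's int comparisons coincide).
def hierRootScan (d : PySem.Dict String String) (cs : List Char) : List Nat → Option String
  | [] => none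
  | l :: rest =>
    if 1 ≤ l ∧ l ≤ cs.length then
      match d.get? (String.ofList (cs.take l)) with
      | some v => some v
      | none => hierRootScan d cs rest
    else hierRootScan d cs rest

def hier_lookup_alt (code : String) (lookup : List (String × String)) : Bool × String :=
  if code = "" then (false, "")
  else
    match hierRootScan (PySem.Dict.ofList lookup) code.toList
        (PySem.List.sorted
          (PySem.Set.ofList ((PySem.Dict.ofList lookup).keys.map (fun key => key.toList.length)))
          (fun l => l) true) with
    | some v => (true, v)
    | none =>
      match (PySem.Dict.ofList lookup).items.find? (fun kv => PySem.Str.startswith kv.1 code) with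
      | some kv => (true, kv.2)
      | none => (false, "")

-- ===== PRECONDITION & SPEC =====
def Spec_hier_lookup (code : String) (lookup : List (String × String)) (out : Bool × String) : Prop := out = hier_lookup_alt code lookup
instance (code : String) (lookup : List (String × String)) (out : Bool × String) : Decidable (Spec_hier_lookup code lookup out) := by unfold Spec_hier_lookup; infer_instance

-- ===== CLAIM (what is proved, stated in full; the proofs are below) =====
def Claim_equal_hier_lookup : Prop := ∀ (code : String) (lookup : List (String × String)), Dom_hier_lookup code lookup → Spec_hier_lookup code lookup (hier_lookup code lookup)

-- ===== LEMMAS AND PROOFS =====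

-- Nat-level shadow of the best-length accumulator of A's fold
def gLen (code : String) (m : Nat) (key : String) : Nat :=
  if PySem.Str.startswith code key && decide (key.toList.length > m) then key.toList.length else m

lemma good_take {code k : String} (h : PySem.Str.startswith code k = true) :
    k.toList = code.toList.take k.toList.length := by
  rw [PySem.Str.startswith_eq, PySem.Chars.startswith_iff] at h
  exact List.prefix_iff_eq_take.mp h

lemma good_len_le {code k : String} (h : PySem.Str.startswith code k = true) :
    k.toList.length ≤ code.toList.length := by
  rw [PySem.Str.startswith_eq, PySem.Chars.startswith_iff] at h
  exact h.length_le

lemma fold_best (code : String) : ∀ (ks : List String) (b : String),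
    b.toList = code.toList.take b.toList.length →
    ks.foldl (hierBestStep code) (b, (b.toList.length : Int)) =
      (String.ofList (code.toList.take (ks.foldl (gLen code) b.toList.length)),
       ((ks.foldl (gLen code) b.toList.length : Nat) : Int)) := by
  intro ks
  induction ks with
  | nil =>
    intro b hb
    simp only [List.foldl_nil]
    rw [← hb, String.ofList_toList]
  | cons k ks ih =>
    intro b hb
    simp only [List.foldl_cons]
    have hcond : (PySem.Str.startswith code k && decide (PySem.Str.len k > ((b.toList.length : Nat) : Int)))
        = (PySem.Str.startswith code k && decide (k.toList.length > b.toList.length)) := by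
      simp [PySem.Str.len_eq]
    by_cases hg : (PySem.Str.startswith code k && decide (k.toList.length > b.toList.length)) = true
    · have hgood : PySem.Str.startswith code k = true := by
        simp only [Bool.and_eq_true] at hg; exact hg.1
      have hstep : hierBestStep code (b, (b.toList.length : Int)) k = (k, (k.toList.length : Int)) := by
        unfold hierBestStep
        rw [show ((b, (b.toList.length : Int)).2 : Int) = ((b.toList.length : Nat) : Int) from rfl] at *
        rw [hcond, hg]
        simp [PySem.Str.len_eq]
      have hgl : gLen code b.toList.length k = k.toList.length := by
        unfold gLen; rw [hg]; simp
      rw [hstep, hgl, ih k (good_take hgood)]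
    · have hstep : hierBestStep code (b, (b.toList.length : Int)) k = (b, (b.toList.length : Int)) := by
        unfold hierBestStep
        rw [show ((b, (b.toList.length : Int)).2 : Int) = ((b.toList.length : Nat) : Int) from rfl] at *
        rw [hcond, Bool.of_not_eq_true hg]
        simp
      have hgl : gLen code b.toList.length k = b.toList.length := by
        unfold gLen; rw [Bool.of_not_eq_true hg]; simp
      rw [hstep, hgl, ih b hb]

lemma fold_g_spec (code : String) : ∀ (ks : List String) (m : Nat),
    m ≤ ks.foldl (gLen code) m ∧
    (ks.foldl (gLen code) m = m ∨ ∃ k ∈ ks, PySem.Str.startswith code k = true ∧ ks.foldl (gLen code) m = k.toList.length) ∧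
    (∀ k ∈ ks, PySem.Str.startswith code k = true → k.toList.length ≤ ks.foldl (gLen code) m) := by
  intro ks
  induction ks with
  | nil => intro m; refine ⟨le_refl _, Or.inl rfl, by simp⟩
  | cons k ks ih =>
    intro m
    simp only [List.foldl_cons]
    obtain ⟨ih1, ih2, ih3⟩ := ih (gLen code m k)
    have hup : m ≤ gLen code m k := by
      unfold gLen; split <;> [skip; exact le_refl _]
      next h => simp only [Bool.and_eq_true, decide_eq_true_eq] at h; omega
    have hcase : gLen code m k = m ∨ (PySem.Str.startswith code k = true ∧ gLen code m k = k.toList.length) := by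
      unfold gLen; split
      next h => simp only [Bool.and_eq_true] at h; exact Or.inr ⟨h.1, rfl⟩
      next => exact Or.inl rfl
    refine ⟨le_trans hup ih1, ?_, ?_⟩
    · rcases ih2 with h | ⟨k', hk', hg', he'⟩
      · rcases hcase with h2 | ⟨hg, h2⟩
        · exact Or.inl (h.trans h2)
        · exact Or.inr ⟨k, List.mem_cons_self, hg, h.trans h2⟩
      · exact Or.inr ⟨k', List.mem_cons_of_mem _ hk', hg', he'⟩
    · intro k' hk' hg'
      rcases List.mem_cons.mp hk' with rfl | hmem
      · have : k'.toList.length ≤ gLen code m k' := by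
          unfold gLen
          by_cases h : (PySem.Str.startswith code k' && decide (k'.toList.length > m)) = true
          · rw [if_pos h]
          · rw [if_neg h]
            simp only [hg', Bool.true_and, decide_eq_true_eq] at h
            omega
        exact le_trans this ih1
      · exact ih3 k' hmem hg'

lemma scan_none (d : PySem.Dict String String) (cs : List Char) :
    ∀ (ls : List Nat),
    (∀ l ∈ ls, 1 ≤ l → l ≤ cs.length → d.get? (String.ofList (cs.take l)) = none) →
    hierRootScan d cs ls = none := by
  intro ls
  induction ls with
  | nil => intro _; rfl
  | cons l rest ih =>
    intro h
    unfold hierRootScan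
    by_cases hg : 1 ≤ l ∧ l ≤ cs.length
    · rw [if_pos hg, h l List.mem_cons_self hg.1 hg.2]
      exact ih (fun j hj h1 h2 => h j (List.mem_cons_of_mem _ hj) h1 h2)
    · rw [if_neg hg]
      exact ih (fun j hj h1 h2 => h j (List.mem_cons_of_mem _ hj) h1 h2)

lemma scan_some (d : PySem.Dict String String) (cs : List Char) {m : Nat} {v : String}
    (hm1 : 1 ≤ m) (hmn : m ≤ cs.length) (hv : d.get? (String.ofList (cs.take m)) = some v) :
    ∀ (ls : List Nat), m ∈ ls → List.Pairwise (fun a b => b ≤ a) ls →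
    (∀ j ∈ ls, m < j → j ≤ cs.length → d.get? (String.ofList (cs.take j)) = none) →
    hierRootScan d cs ls = some v := by
  intro ls
  induction ls with
  | nil => intro h; cases h
  | cons l rest ih =>
    intro hmem hpw hnone
    obtain ⟨hhead, hpw'⟩ := List.pairwise_cons.mp hpw
    unfold hierRootScan
    by_cases hml : m = l
    · rw [if_pos ⟨hml ▸ hm1, hml ▸ hmn⟩, ← hml, hv]
    · have hmr : m ∈ rest := by
        rcases List.mem_cons.mp hmem with h | h
        · exact absurd h hml
        · exact h
      have hlt : m < l := lt_of_le_of_ne (hhead m hmr) hml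
      by_cases hg : 1 ≤ l ∧ l ≤ cs.length
      · rw [if_pos hg, hnone l List.mem_cons_self hlt hg.2]
        exact ih hmr hpw' (fun j hj h1 h2 => hnone j (List.mem_cons_of_mem _ hj) h1 h2)
      · rw [if_neg hg]
        exact ih hmr hpw' (fun j hj h1 h2 => hnone j (List.mem_cons_of_mem _ hj) h1 h2)

lemma mem_keys_of_get?_eq_some {d : PySem.Dict String String} {k v : String}
    (h : d.get? k = some v) : k ∈ d.keys := by
  by_contra hmem
  rw [(PySem.Dict.get?_eq_none_iff_not_mem_keys d k).mpr hmem] at h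
  cases h

-- any hit of the prefix scan is a "good" key of length l
lemma hit_good {d : PySem.Dict String String} {code : String} {l : Nat} {v : String}
    (_hl1 : 1 ≤ l) (hln : l ≤ code.toList.length)
    (h : d.get? (String.ofList (code.toList.take l)) = some v) :
    (String.ofList (code.toList.take l)) ∈ d.keys ∧
    PySem.Str.startswith code (String.ofList (code.toList.take l)) = true ∧
    (String.ofList (code.toList.take l)).toList.length = l := by
  refine ⟨mem_keys_of_get?_eq_some h, ?_, ?_⟩
  · rw [PySem.Str.startswith_eq, PySem.Chars.startswith_iff]
    simp [List.take_prefix]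
  · rw [String.toList_ofList, List.length_take]; omega

theorem hier_lookup_spec : Claim_equal_hier_lookup := by
  intro code lookup _
  unfold Spec_hier_lookup hier_lookup hier_lookup_alt
  by_cases hc : code = ""
  · simp [hc]
  · rw [if_neg hc, if_neg hc]
    set d := PySem.Dict.ofList lookup with hd
    set cs := code.toList with hcs
    have hn : 1 ≤ cs.length := by
      rcases Nat.eq_zero_or_pos cs.length with h | h
      · exact absurd (by simpa [hcs, String.toList_eq_nil_iff] using List.length_eq_zero_iff.mp h) hc
      · exact h
    have hofl : String.ofList cs = code := by simp [hcs]
    set cands := PySem.List.sorted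
        (PySem.Set.ofList (d.keys.map (fun key => key.toList.length))) (fun l => l) true
      with hcands
    have hpw : List.Pairwise (fun a b => b ≤ a) cands := by
      rw [hcands]
      simpa using PySem.List.sorted_pairwise_rev
        (PySem.Set.ofList (d.keys.map (fun key => key.toList.length))) (fun l => l)
    have hmemc : ∀ k ∈ d.keys, k.toList.length ∈ cands := by
      intro k hk
      rw [hcands, PySem.List.mem_sorted, PySem.Set.mem_ofList]
      exact List.mem_map_of_mem hk
    rw [PySem.Dict.contains_eq_isSome_get?]
    cases hq : d.get? code with
    | some v =>
      have hscan : hierRootScan d cs cands = some v := by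
        refine scan_some d cs (m := cs.length) hn (le_refl _)
          (by rw [List.take_length, hofl]; exact hq) cands ?_ hpw (by intro j _ h1 h2; omega)
        exact hmemc code (mem_keys_of_get?_eq_some hq)
      simp only [Option.isSome_some, if_true]
      rw [hscan, PySem.Dict.getD_of_get?_eq_some d "" hq]
    | none =>
      simp only [Option.isSome_none, Bool.false_eq_true, if_false]
      have hb0 : ("" : String).toList = cs.take (("" : String).toList.length) := by simp
      have hfold := fold_best code d.keys "" hb0
      simp only [show (("" : String).toList.length) = 0 by simp] at hfold
      rw [show ((0 : Nat) : Int) = (0 : Int) by simp] at hfold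
      set M := d.keys.foldl (gLen code) 0 with hM
      obtain ⟨-, g2, g3⟩ := fold_g_spec code d.keys 0
      rw [← hM] at g2 g3
      rw [hfold]
      by_cases hM0 : M = 0
      · -- no matching root: both fall through to the child scan
        have hbest : String.ofList (cs.take M) = "" := by
          rw [hM0]; simp
        rw [hbest]
        simp only [ne_eq, not_true_eq_false, ite_false]
        have hnone : hierRootScan d cs cands = none := by
          apply scan_none
          intro l _ h1 h2
          cases hg : d.get? (String.ofList (cs.take l)) with
          | none => rfl
          | some w =>
            obtain ⟨hmem, hgood, hlen⟩ := hit_good h1 h2 hg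
            have := g3 _ hmem hgood
            rw [hlen, hM0] at this; omega
        rw [hnone]
        -- child scans: A over keys, B over items
        have hkeys : d.keys = d.items.map Prod.fst := rfl
        have hpe : ((fun key => PySem.Str.startswith key code) ∘ Prod.fst) =
            (fun kv : String × String => PySem.Str.startswith kv.1 code) := rfl
        rw [hkeys, List.find?_map, hpe]
        cases hf : d.items.find? (fun kv : String × String => PySem.Str.startswith kv.1 code) with
        | none => rfl
        | some kv =>
          simp only [Option.map_some]
          have hmem : kv ∈ d.items := List.mem_of_find?_eq_some hf
          have : d.getD kv.1 "" = kv.2 :=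
            PySem.Dict.getD_of_mem_items d (by exact hmem) (PySem.Dict.nodup_keys_ofList lookup) ""
          rw [this]
      · -- a longest root exists: M ≥ 1 and the prefix of length M is a key
        rcases g2 with h | ⟨k, hk, hgood, hlen⟩
        · omega
        have hkeq : String.ofList (cs.take M) = k := by
          rw [hlen, hcs, ← good_take hgood, String.ofList_toList]
        have hMn : M ≤ cs.length := by rw [hlen]; exact good_len_le hgood
        have hne : String.ofList (cs.take M) ≠ "" := by
          rw [hkeq]
          intro h
          have h2 : k.toList.length = 0 := by rw [h]; rfl
          omega
        rw [if_pos hne]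
        cases hgk : d.get? k with
        | none =>
          exact absurd ((PySem.Dict.get?_eq_none_iff_not_mem_keys d k).mp hgk) (by simp [hk])
        | some w =>
          have hscan : hierRootScan d cs cands = some w := by
            refine scan_some d cs (m := M) (by omega) hMn (by rw [hkeq]; exact hgk) cands
              (by rw [hlen]; exact hmemc k hk) hpw ?_
            intro j _ h1 h2
            cases hg : d.get? (String.ofList (cs.take j)) with
            | none => rfl
            | some u =>
              obtain ⟨hmem, hgood', hlen'⟩ := hit_good (by omega) h2 hg
              have := g3 _ hmem hgood'
              rw [hlen'] at this; omega
          rw [hscan, hkeq, PySem.Dict.getD_of_get?_eq_some d "" hgk]
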